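-- pv_equiv track=rewrite | github.com/NaC-L/Mergen | scripts/rewrite/generate_vm_sample.py | reduce_value
-- ===== SOURCE A (Python) =====
-- WIDTHS = {
--     # name → (bits, mask, threshold (mid-point), n_mask, prefix, enum_prefix, identity_for_and)
--     "byte":  ( 8, 0xFF,       0x80,       7, "b", "B", 0xFF),
--     "word":  (16, 0xFFFF,     0x8000,     3, "w", "W", 0xFFFF),
--     "dword": (32, 0xFFFFFFFF, 0x80000000, 1, "d", "D", 0xFFFFFFFF),
-- }
--
-- def reduce_value(width: str, op: str, pred: str, x: int) -> int:
--     """Mirror the C reference exactly, returning the uint64 the lift target returns."""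
--     bits, mask, threshold, n_mask, *_rest = WIDTHS[width]
--     n = ((x & n_mask) + 1) & 0xFFFFFFFFFFFFFFFF
--     s = x & 0xFFFFFFFFFFFFFFFF
--     if op == "and":
--         acc = mask
--     else:  # or, xor, sum
--         acc = 0
--
--     while n > 0:
--         lane = s & mask
--         if pred == "uge":
--             qualifies = lane >= threshold
--         else:
--             qualifies = lane < threshold
--
--         # AND uses the mask as the false-branch identity; the others use 0.
--         false_id = mask if op == "and" else 0
--         gated = lane if qualifies else false_id
--
--         if op == "and":
--             acc = acc & gated
--         elif op == "or":
--             acc = acc | gated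
--         elif op == "xor":
--             acc = acc ^ gated
--         else:  # sum
--             acc = (acc + gated) & 0xFFFFFFFFFFFFFFFF
--
--         s = (s >> bits) & 0xFFFFFFFFFFFFFFFF
--         n -= 1
--
--     return acc & 0xFFFFFFFFFFFFFFFF
-- ===== SOURCE B (Python) =====
-- MASK64 = 0xFFFFFFFFFFFFFFFF
--
-- WIDTHS = {
--     "byte":  ( 8, 0xFF,       0x80,       7, "b", "B", 0xFF),
--     "word":  (16, 0xFFFF,     0x8000,     3, "w", "W", 0xFFFF),
--     "dword": (32, 0xFFFFFFFF, 0x80000000, 1, "d", "D", 0xFFFFFFFF),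
-- }
--
-- def _reduce(f, xs, acc):
--     """Tail-recursive left fold."""
--     if not xs:
--         return acc
--     return _reduce(f, xs[1:], f(acc, xs[0]))
--
-- def reduce_value(width: str, op: str, pred: str, x: int) -> int:
--     """Closed-form lane extraction + one generic fold over gated lanes."""
--     bits, mask, threshold, n_mask, *_rest = WIDTHS[width]
--     n = (x & n_mask) + 1
--     s = x & MASK64
--     lanes = [(s >> (bits * i)) & mask for i in range(n)]
--     if pred == "uge":
--         ok = lambda lane: lane >= threshold
--     else:
--         ok = lambda lane: lane < threshold
--     if op == "and":
--         combine, ident = (lambda a, b: a & b), mask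
--     elif op == "or":
--         combine, ident = (lambda a, b: a | b), 0
--     elif op == "xor":
--         combine, ident = (lambda a, b: a ^ b), 0
--     else:  # sum
--         combine, ident = (lambda a, b: (a + b) & MASK64), 0
--     gated = [lane if ok(lane) else ident for lane in lanes]
--     return _reduce(combine, gated, ident) & MASK64
-- ===== Notes on version B (the rewrite author's own statement) =====
-- stated objective: alternative
-- what changed: Replaces A's destructive while loop (shift-and-remask the state, count down n, branch chain inside each iteration) with a closed-form lane list [(s >> bits*i) & mask for i in range(n)], a (combine, identity) pair selected once per op, and a single generic tail-recursive fold over the gated lanes; Pre_ excludes only unknown width names, on which A raises KeyError (as does B).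
import Mathlib
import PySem

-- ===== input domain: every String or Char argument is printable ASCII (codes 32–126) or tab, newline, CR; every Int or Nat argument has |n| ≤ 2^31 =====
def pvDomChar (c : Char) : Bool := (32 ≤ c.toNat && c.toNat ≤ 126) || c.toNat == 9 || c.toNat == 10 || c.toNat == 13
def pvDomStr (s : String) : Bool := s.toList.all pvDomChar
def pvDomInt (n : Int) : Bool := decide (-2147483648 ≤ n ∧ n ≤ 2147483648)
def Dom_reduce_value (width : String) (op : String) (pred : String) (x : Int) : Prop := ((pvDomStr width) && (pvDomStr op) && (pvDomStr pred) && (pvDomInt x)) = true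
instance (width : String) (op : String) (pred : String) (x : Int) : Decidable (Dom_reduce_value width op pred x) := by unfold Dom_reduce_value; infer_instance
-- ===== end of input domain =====

-- B replaces A's destructive shift-and-countdown while loop by a closed-form lane list
-- ((s >> bits*i) & mask for i < n), a once-selected (combine, identity) pair per op and a
-- single generic fold over the gated lanes (objective: alternative decomposition, same cost).

-- ===== PORT A =====
-- WIDTHS[width] : (bits, mask, threshold, n_mask) — the trailing string/identity fields are unused by A
def widthsA : PySem.Dict String (Int × Int × Int × Int) :=
  PySem.Dict.ofList [("byte", ((8 : Int), (0xFF : Int), (0x80 : Int), (7 : Int))),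
   ("word", ((16 : Int), (0xFFFF : Int), (0x8000 : Int), (3 : Int))),
   ("dword", ((32 : Int), (0xFFFFFFFF : Int), (0x80000000 : Int), (1 : Int)))]

-- the while loop, fuel = n (A's n is a nonnegative int ≤ 8); bits is a nonnegative literal, so `>>> bits.toNat` is Python's `>> bits`
def loopA (op pred : String) (bits mask threshold : Int) : Nat → Int → Int → Int
  | 0, _, acc => acc
  | Nat.succ m, s, acc =>
    let lane := PySem.Int.band s mask
    let qualifies := if pred = "uge" then decide (lane ≥ threshold) else decide (lane < threshold)
    let falseId := if op = "and" then mask else 0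
    let gated := if qualifies then lane else falseId
    let acc' :=
      if op = "and" then PySem.Int.band acc gated
      else if op = "or" then PySem.Int.bor acc gated
      else if op = "xor" then PySem.Int.bxor acc gated
      else PySem.Int.band (acc + gated) 0xFFFFFFFFFFFFFFFF
    loopA op pred bits mask threshold m (PySem.Int.band (s >>> bits.toNat) 0xFFFFFFFFFFFFFFFF) acc'

def reduce_value (width : String) (op : String) (pred : String) (x : Int) : Int :=
  match widthsA.get? width with
  | none => 0   -- KeyError in Python: excluded by Pre_reduce_value
  | some (bits, mask, threshold, n_mask) =>
    let n := PySem.Int.band (PySem.Int.band x n_mask + 1) 0xFFFFFFFFFFFFFFFF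
    let s := PySem.Int.band x 0xFFFFFFFFFFFFFFFF
    let acc0 : Int := if op = "and" then mask else 0
    PySem.Int.band (loopA op pred bits mask threshold n.toNat s acc0) 0xFFFFFFFFFFFFFFFF

-- ===== PORT B =====
def widthsB : PySem.Dict String (Int × Int × Int × Int) :=
  PySem.Dict.ofList [("byte", ((8 : Int), (0xFF : Int), (0x80 : Int), (7 : Int))),
   ("word", ((16 : Int), (0xFFFF : Int), (0x8000 : Int), (3 : Int))),
   ("dword", ((32 : Int), (0xFFFFFFFF : Int), (0x80000000 : Int), (1 : Int)))]

-- Source B's _reduce: tail-recursive left fold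
def foldB (f : Int → Int → Int) : List Int → Int → Int
  | [], acc => acc
  | v :: rest, acc => foldB f rest (f acc v)

def reduce_value_alt (width : String) (op : String) (pred : String) (x : Int) : Int :=
  match widthsB.get? width with
  | none => 0   -- KeyError in Python: excluded by Pre_reduce_value
  | some (bits, mask, threshold, n_mask) =>
    let n := PySem.Int.band x n_mask + 1
    let s := PySem.Int.band x 0xFFFFFFFFFFFFFFFF
    -- bits*i is a nonnegative int, so `>>> (bits*i).toNat` is Python's `>> (bits*i)`
    let lanes := (PySem.List.pyRange 0 n 1).map (fun i => PySem.Int.band (s >>> (bits * i).toNat) mask)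
    let ok : Int → Bool := if pred = "uge" then (fun lane => decide (lane ≥ threshold)) else (fun lane => decide (lane < threshold))
    let ci : (Int → Int → Int) × Int :=
      if op = "and" then ((fun a b => PySem.Int.band a b), mask)
      else if op = "or" then ((fun a b => PySem.Int.bor a b), 0)
      else if op = "xor" then ((fun a b => PySem.Int.bxor a b), 0)
      else ((fun a b => PySem.Int.band (a + b) 0xFFFFFFFFFFFFFFFF), 0)
    let gated := lanes.map (fun lane => if ok lane then lane else ci.2)
    PySem.Int.band (foldB ci.1 gated ci.2) 0xFFFFFFFFFFFFFFFF

-- ===== PRECONDITION & SPEC =====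
-- Pre_ excludes exactly the widths not in WIDTHS, on which Python A raises KeyError
def Pre_reduce_value (width : String) (op : String) (pred : String) (x : Int) : Prop :=
  width = "byte" ∨ width = "word" ∨ width = "dword"
instance (width : String) (op : String) (pred : String) (x : Int) : Decidable (Pre_reduce_value width op pred x) := by unfold Pre_reduce_value; infer_instance

def pvWitness_reduce_value : String × String × String × Int := ("word", "sum", "uge", 300)

def Spec_reduce_value (width : String) (op : String) (pred : String) (x : Int) (out : Int) : Prop := out = reduce_value_alt width op pred x
instance (width : String) (op : String) (pred : String) (x : Int) (out : Int) : Decidable (Spec_reduce_value width op pred x out) := by unfold Spec_reduce_value; infer_instance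

-- ===== CLAIM (what is proved, stated in full; the proofs are below) =====
def Claim_equal_reduce_value : Prop := ∀ (width : String) (op : String) (pred : String) (x : Int), Dom_reduce_value width op pred x → Pre_reduce_value width op pred x → Spec_reduce_value width op pred x (reduce_value width op pred x)

-- ===== LEMMAS AND PROOFS =====

-- masking by a nonnegative literal is bounded
theorem band_le_right (x : Int) (b : Nat) : 0 ≤ PySem.Int.band x ↑b ∧ PySem.Int.band x ↑b ≤ ↑b := by
  unfold PySem.Int.band
  split_ifs with h1 h2 h2 <;> constructor <;> try omega
  exact_mod_cast Int.ofNat_le.mpr Nat.and_le_right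

-- masking a value already in [0, 2^64) by 2^64-1 is the identity
theorem band_m64_id (t : Int) (h0 : 0 ≤ t) (h1 : t < 18446744073709551616) :
    PySem.Int.band t 0xFFFFFFFFFFFFFFFF = t := by
  rw [PySem.Int.band_of_nonneg h0 (by norm_num)]
  have : (0xFFFFFFFFFFFFFFFF : Int).toNat = 2 ^ 64 - 1 := by rfl
  rw [this, Nat.and_two_pow_sub_one_eq_mod, Nat.mod_eq_of_lt (by omega)]
  omega

-- core: A's loop over m lanes equals a fold of f over the gated closed-form lane list
theorem loop_eq_fold (op pred : String) (bits mask threshold : Int)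
    (f : Int → Int → Int)
    (hf : ∀ a g, f a g = if op = "and" then PySem.Int.band a g
      else if op = "or" then PySem.Int.bor a g
      else if op = "xor" then PySem.Int.bxor a g
      else PySem.Int.band (a + g) 0xFFFFFFFFFFFFFFFF)
    (ident : Int) (hi : ident = if op = "and" then mask else 0) :
    ∀ (m : Nat) (s acc : Int), 0 ≤ s → s < 18446744073709551616 →
    loopA op pred bits mask threshold m s acc =
      foldB f ((List.range m).map (fun i =>
        let lane := PySem.Int.band (s >>> (bits.toNat * i)) mask
        if (if pred = "uge" then decide (lane ≥ threshold) else decide (lane < threshold)) then lane else ident)) acc := by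
  intro m
  induction m with
  | zero => intro s acc _ _; simp [loopA, foldB]
  | succ m ih =>
    intro s acc hs0 hs1
    have hdiv : s >>> bits.toNat = s / ↑(2 ^ bits.toNat) := Int.shiftRight_eq_div_pow s bits.toNat
    have hsr0 : 0 ≤ s >>> bits.toNat := by
      rw [hdiv]; exact Int.ediv_nonneg hs0 (by positivity)
    have hsr1 : s >>> bits.toNat < 18446744073709551616 :=
      lt_of_le_of_lt (by rw [hdiv]; exact Int.ediv_le_self _ hs0) hs1
    rw [List.range_succ_eq_map, List.map_cons]
    simp only [loopA, foldB, List.map_map]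
    rw [band_m64_id _ hsr0 hsr1, ih _ _ hsr0 hsr1]
    congr 1
    · apply List.map_congr_left
      intro i _
      simp only [Function.comp]
      rw [← Int.shiftRight_add]
      have hidx : bits.toNat + bits.toNat * i = bits.toNat * i.succ := by
        rw [Nat.mul_succ, Nat.add_comm]
      rw [hidx]
    · rw [hf]
      simp only [Nat.mul_zero, Int.shiftRight_zero, hi]


-- proof-only copies of the two match arms (the ports above are self-contained)
def bodyA (op pred : String) (x bits mask threshold n_mask : Int) : Int :=
  PySem.Int.band (loopA op pred bits mask threshold
      (PySem.Int.band (PySem.Int.band x n_mask + 1) 0xFFFFFFFFFFFFFFFF).toNat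
      (PySem.Int.band x 0xFFFFFFFFFFFFFFFF)
      (if op = "and" then mask else 0)) 0xFFFFFFFFFFFFFFFF

def ciB (op : String) (mask : Int) : (Int → Int → Int) × Int :=
  if op = "and" then ((fun a b => PySem.Int.band a b), mask)
  else if op = "or" then ((fun a b => PySem.Int.bor a b), 0)
  else if op = "xor" then ((fun a b => PySem.Int.bxor a b), 0)
  else ((fun a b => PySem.Int.band (a + b) 0xFFFFFFFFFFFFFFFF), 0)

def bodyB (op pred : String) (x bits mask threshold n_mask : Int) : Int :=
  PySem.Int.band (foldB (ciB op mask).1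
      (((PySem.List.pyRange 0 (PySem.Int.band x n_mask + 1) 1).map
          (fun i => PySem.Int.band ((PySem.Int.band x 0xFFFFFFFFFFFFFFFF) >>> (bits * i).toNat) mask)).map
        (fun lane => if (if pred = "uge" then (fun l : Int => decide (l ≥ threshold)) else (fun l : Int => decide (l < threshold))) lane then lane else (ciB op mask).2))
      (ciB op mask).2) 0xFFFFFFFFFFFFFFFF

theorem key (op pred : String) (x bits mask threshold : Int) (bnn : 0 ≤ bits) (k : Nat) (hk : k < 256) :
    bodyA op pred x bits mask threshold ↑k = bodyB op pred x bits mask threshold ↑k := by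
  unfold bodyA bodyB
  have hbx := band_le_right x k
  have hM : ((0xFFFFFFFFFFFFFFFF : Nat) : Int) = 0xFFFFFFFFFFFFFFFF := by norm_num
  have hs := band_le_right x 0xFFFFFFFFFFFFFFFF
  rw [hM] at hs
  have hn : PySem.Int.band (PySem.Int.band x ↑k + 1) 0xFFFFFFFFFFFFFFFF = PySem.Int.band x ↑k + 1 :=
    band_m64_id _ (by omega) (by omega)
  rw [hn]
  have htn : PySem.Int.band x ↑k + 1 = ((PySem.Int.band x ↑k + 1).toNat : Int) := by omega
  rw [htn, PySem.List.pyRange_zero_natCast, List.map_map, List.map_map, Int.toNat_natCast]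
  rw [loop_eq_fold op pred bits mask threshold (ciB op mask).1
      (fun a g => by unfold ciB; split_ifs <;> rfl) (ciB op mask).2 (by unfold ciB; split_ifs <;> rfl)
      _ _ _ hs.1 (by omega)]
  have hacc : (ciB op mask).2 = (if op = "and" then mask else (0 : Int)) := by
    unfold ciB; split_ifs <;> rfl
  rw [hacc]
  refine congrArg (fun l => PySem.Int.band (foldB (ciB op mask).1 l (if op = "and" then mask else 0)) 0xFFFFFFFFFFFFFFFF) (List.map_congr_left ?_)
  intro j _
  have hbj : (bits * (j : Int)).toNat = bits.toNat * j := by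
    have h : bits * (j : Int) = ((bits.toNat * j : Nat) : Int) := by
      push_cast [Int.toNat_of_nonneg bnn]; ring
    rw [h, Int.toNat_natCast]
  simp only [Function.comp, hbj]
  by_cases hp : pred = "uge" <;> simp [hp]

-- ===== VERDICT (by name: the statement is the Claim_ definition above) =====
theorem reduce_value_spec : Claim_equal_reduce_value := by
  intro width op pred x _ hpre
  unfold Spec_reduce_value
  rcases hpre with h | h | h <;> subst h
  · exact (key op pred x 8 0xFF 0x80 (by norm_num) 7 (by norm_num))
  · exact (key op pred x 16 0xFFFF 0x8000 (by norm_num) 3 (by norm_num))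
  · exact (key op pred x 32 0xFFFFFFFF 0x80000000 (by norm_num) 1 (by norm_num))
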